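-- pv_equiv track=rewrite | github.com/WuyiWong/text_classification_sentiment_analysis | src/prompt_design_v2.py | sentiment_matching_v2
-- ===== SOURCE A (Python) =====
-- def sentiment_matching_v2(sentiments_dict_row, review):
--     review = review.lower()
--
--     # Design and Appearance
--     sentiments_pool_1 = ['cute', 'cute style', 'flattering', 'beautiful', 'pretty', 'color', 'cool', 'lining', 'flowy', 'lovely']
--     for char in sentiments_pool_1:
--         if char in review and sentiments_dict_row['Design and Appearance'] != 'Negative':
--             sentiments_dict_row['Design and Appearance'] = 'Positive'
--     sentiments_pool_1_1 = ['pretty dress']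
--     for char in sentiments_pool_1_1:
--         if char in review:
--             sentiments_dict_row['Design and Appearance'] = 'Positive'
--
--     # Size and Fit
--     sentiments_pool_2 = ['small']
--     for char in sentiments_pool_2:
--         if char in review and sentiments_dict_row['Size and Fit'] != 'Positive':
--             sentiments_dict_row['Size and Fit'] = 'Negative'
--     sentiments_pool_2_1 = ['fit']
--     for char in sentiments_pool_2_1:
--         if char in review and sentiments_dict_row['Size and Fit'] != 'Negative':
--             sentiments_dict_row['Size and Fit'] = 'Positive'
--     sentiments_pool_2_2 = ['tight']
--     for char in sentiments_pool_2_2: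
--         if char in review:
--             sentiments_dict_row['Size and Fit'] = 'Negative'
--
--     # Product Quality
--     # sentiments_pool_3 = ['cheap', 'itchy']
--     # for char in sentiments_pool_3:
--     #     if char in review and sentiments_dict_row['Product Quality'] != 'Positive':
--     #         sentiments_dict_row['Product Quality'] = 'Negative'
--     # sentiments_pool_3_1 = ['material is nice', 'material is pleasant']
--     # for char in sentiments_pool_3_1:
--     #     if char in review:
--     #         sentiments_dict_row['Product Quality'] = 'Positive'
--
--     # comfort
--     sentiments_pool_4 = ['comfort', 'comfy', 'comfortable']
--     for char in sentiments_pool_4: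
--         if char in review and sentiments_dict_row['Comfort'] != 'Negative':
--             sentiments_dict_row['Comfort'] = 'Positive'
--
--
--     # Usage Scenarios and Applicability
--     sentiments_pool_6 = ['nature calls']
--     for char in sentiments_pool_6:
--         if char in review and sentiments_dict_row['Usage Scenarios and Applicability'] != 'Positive':
--             sentiments_dict_row['Usage Scenarios and Applicability'] = 'Negative'
--
--     # Washing and Maintenance
--     sentiments_pool_7 = ['steam', 'iron']
--     for char in sentiments_pool_7:
--         if char in review and sentiments_dict_row['Washing and Maintenance'] != 'Positive':
--             sentiments_dict_row['Washing and Maintenance'] = 'Negative'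
--
--     # Fabric
--     sentiments_pool_8 = ['different', 'itchy']
--     for char in sentiments_pool_8:
--         if char in review and sentiments_dict_row['Fabric'] == 'Neutral':
--             sentiments_dict_row['Fabric'] = 'Negative'
--     sentiments_pool_3_1 = ['material is nice', 'material is pleasant']
--     for char in sentiments_pool_3_1:
--         if char in review:
--             sentiments_dict_row['Fabric'] = 'Positive'
--
--     return sentiments_dict_row
-- ===== SOURCE B (Python) =====
-- # Reverse-priority rewrite: instead of nine in-place keyword loops whose guards
-- # read the evolving dict, each category gets one pure first-match-wins judge
-- # (rules checked in reverse priority, the fit-guard rewritten in closed form),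
-- # and the dict is read and written at most once per category.
-- # Like A, mutates and returns the same dict.
--
-- def sentiment_matching_v2(sentiments_dict_row, review):
--     low = review.lower()
--
--     def hit(*kws):
--         return any(k in low for k in kws)
--
--     # Each judge maps the category's current value (None if the key is absent)
--     # to the value A would leave there, or None if A never writes the key.
--     # Rules are examined in reverse order, so the first match is the winner.
--     def design(cur):
--         if hit('pretty dress'):
--             return 'Positive'
--         if hit('cute', 'cute style', 'flattering', 'beautiful', 'pretty',
--                'color', 'cool', 'lining', 'flowy', 'lovely') and cur != 'Negative':
--             return 'Positive'
--         return None
--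
--     def size_fit(cur):
--         if hit('tight'):
--             return 'Negative'
--         # 'fit' fires on the value left by the 'small' rule; in closed form:
--         if hit('fit') and (cur == 'Positive' or (cur != 'Negative' and not hit('small'))):
--             return 'Positive'
--         if hit('small') and cur != 'Positive':
--             return 'Negative'
--         return None
--
--     def comfort(cur):
--         if hit('comfort', 'comfy', 'comfortable') and cur != 'Negative':
--             return 'Positive'
--         return None
--
--     def usage(cur):
--         if hit('nature calls') and cur != 'Positive':
--             return 'Negative'
--         return None
--
--     def washing(cur):
--         if hit('steam', 'iron') and cur != 'Positive':
--             return 'Negative'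
--         return None
--
--     def fabric(cur):
--         if hit('material is nice', 'material is pleasant'):
--             return 'Positive'
--         if hit('different', 'itchy') and cur == 'Neutral':
--             return 'Negative'
--         return None
--
--     for key, judge in (('Design and Appearance', design),
--                        ('Size and Fit', size_fit),
--                        ('Comfort', comfort),
--                        ('Usage Scenarios and Applicability', usage),
--                        ('Washing and Maintenance', washing),
--                        ('Fabric', fabric)):
--         verdict = judge(sentiments_dict_row.get(key))
--         if verdict is not None:
--             sentiments_dict_row[key] = verdict
--     return sentiments_dict_row
-- ===== Notes on version B (the rewrite author's own statement) =====
-- stated objective: alternative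
-- what changed: A's nine sequential last-writer-wins keyword loops that mutate the dict per rule are replaced by one pure first-match-wins judge per category (rules checked in reverse priority, the 'fit' guard algebraically collapsed into a closed form over the ORIGINAL value), so the dict is read once and written at most once per category instead of once per matching keyword.
import Mathlib
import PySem

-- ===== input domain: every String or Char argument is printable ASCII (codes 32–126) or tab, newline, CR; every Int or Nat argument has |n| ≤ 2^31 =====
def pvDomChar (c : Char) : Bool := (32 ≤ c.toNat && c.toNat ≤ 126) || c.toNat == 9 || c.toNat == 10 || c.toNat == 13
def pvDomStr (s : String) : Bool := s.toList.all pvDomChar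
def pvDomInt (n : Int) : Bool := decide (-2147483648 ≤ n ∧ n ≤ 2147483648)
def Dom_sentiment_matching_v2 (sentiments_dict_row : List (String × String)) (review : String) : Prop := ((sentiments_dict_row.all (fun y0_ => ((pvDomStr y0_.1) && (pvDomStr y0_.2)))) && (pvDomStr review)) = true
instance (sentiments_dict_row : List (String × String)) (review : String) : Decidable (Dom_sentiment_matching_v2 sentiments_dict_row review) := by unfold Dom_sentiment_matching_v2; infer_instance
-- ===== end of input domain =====

-- B replaces A's nine sequential in-place keyword loops by one pure
-- first-match-wins judge per category (reverse rule priority, the 'fit' guard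
-- collapsed to a closed form over the original value), reading and writing the
-- dict at most once per category (objective: alternative).  Both versions
-- mutate the Python dict in place; the equivalence is about the returned list.

-- ===== PORT A =====
-- 'for char in pool: if char in review and d[key] != ref: d[key] = v'
def pvLoopNe (r : String) (key ref v : String) (pool : List String) (d : PySem.Dict String String) : PySem.Dict String String :=
  pool.foldl (fun d kw =>
    if PySem.Str.isIn kw r = true ∧ d.getD key "" ≠ ref then d.insert key v else d) d

-- 'for char in pool: if char in review and d[key] == ref: d[key] = v'
def pvLoopEq (r : String) (key ref v : String) (pool : List String) (d : PySem.Dict String String) : PySem.Dict String String :=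
  pool.foldl (fun d kw =>
    if PySem.Str.isIn kw r = true ∧ d.getD key "" = ref then d.insert key v else d) d

-- 'for char in pool: if char in review: d[key] = v'
def pvLoopUncond (r : String) (key v : String) (pool : List String) (d : PySem.Dict String String) : PySem.Dict String String :=
  pool.foldl (fun d kw => if PySem.Str.isIn kw r = true then d.insert key v else d) d

def sentiment_matching_v2 (sentiments_dict_row : List (String × String)) (review : String) : List (String × String) :=
  let r := PySem.Str.lower review
  let d : PySem.Dict String String := PySem.Dict.mk sentiments_dict_row
  let d := pvLoopNe r "Design and Appearance" "Negative" "Positive"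
    ["cute", "cute style", "flattering", "beautiful", "pretty", "color", "cool", "lining", "flowy", "lovely"] d
  let d := pvLoopUncond r "Design and Appearance" "Positive" ["pretty dress"] d
  let d := pvLoopNe r "Size and Fit" "Positive" "Negative" ["small"] d
  let d := pvLoopNe r "Size and Fit" "Negative" "Positive" ["fit"] d
  let d := pvLoopUncond r "Size and Fit" "Negative" ["tight"] d
  let d := pvLoopNe r "Comfort" "Negative" "Positive" ["comfort", "comfy", "comfortable"] d
  let d := pvLoopNe r "Usage Scenarios and Applicability" "Positive" "Negative" ["nature calls"] d
  let d := pvLoopNe r "Washing and Maintenance" "Positive" "Negative" ["steam", "iron"] d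
  let d := pvLoopEq r "Fabric" "Neutral" "Negative" ["different", "itchy"] d
  let d := pvLoopUncond r "Fabric" "Positive" ["material is nice", "material is pleasant"] d
  d.items

-- ===== PORT B =====
-- 'any(k in low for k in kws)'
def pvHit (low : String) (kws : List String) : Bool := kws.any (fun k => PySem.Str.isIn k low)

-- each judge maps the category's current value (none if the key is absent) to
-- the value to write, or none if nothing is written; first match wins
def pvDesign (low : String) (cur : Option String) : Option String :=
  if pvHit low ["pretty dress"] = true then some "Positive"
  else if pvHit low ["cute", "cute style", "flattering", "beautiful", "pretty", "color", "cool", "lining", "flowy", "lovely"] = true ∧ cur ≠ some "Negative" then some "Positive"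
  else none

def pvSizeFit (low : String) (cur : Option String) : Option String :=
  if pvHit low ["tight"] = true then some "Negative"
  else if pvHit low ["fit"] = true ∧ (cur = some "Positive" ∨ (cur ≠ some "Negative" ∧ pvHit low ["small"] = false)) then some "Positive"
  else if pvHit low ["small"] = true ∧ cur ≠ some "Positive" then some "Negative"
  else none

def pvComfort (low : String) (cur : Option String) : Option String :=
  if pvHit low ["comfort", "comfy", "comfortable"] = true ∧ cur ≠ some "Negative" then some "Positive"
  else none

def pvUsage (low : String) (cur : Option String) : Option String :=
  if pvHit low ["nature calls"] = true ∧ cur ≠ some "Positive" then some "Negative"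
  else none

def pvWashing (low : String) (cur : Option String) : Option String :=
  if pvHit low ["steam", "iron"] = true ∧ cur ≠ some "Positive" then some "Negative"
  else none

def pvFabric (low : String) (cur : Option String) : Option String :=
  if pvHit low ["material is nice", "material is pleasant"] = true then some "Positive"
  else if pvHit low ["different", "itchy"] = true ∧ cur = some "Neutral" then some "Negative"
  else none

-- 'verdict = judge(d.get(key)); if verdict is not None: d[key] = verdict'
def pvStep (d : PySem.Dict String String) (p : String × (Option String → Option String)) : PySem.Dict String String :=
  match p.2 (d.get? p.1) with
  | some v => d.insert p.1 v
  | none => d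

def sentiment_matching_v2_alt (sentiments_dict_row : List (String × String)) (review : String) : List (String × String) :=
  let low := PySem.Str.lower review
  (([("Design and Appearance", pvDesign low),
     ("Size and Fit", pvSizeFit low),
     ("Comfort", pvComfort low),
     ("Usage Scenarios and Applicability", pvUsage low),
     ("Washing and Maintenance", pvWashing low),
     ("Fabric", pvFabric low)] : List (String × (Option String → Option String))).foldl pvStep (PySem.Dict.mk sentiments_dict_row)).items

-- ===== PRECONDITION & SPEC =====
-- Pre_ excludes exactly the inputs on which Python A raises KeyError: a guarded
-- rule's keyword occurs in the lowercased review but the rule's category key is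
-- missing from the dict (the unconditional rules never read the dict).
def Pre_sentiment_matching_v2 (sentiments_dict_row : List (String × String)) (review : String) : Prop :=
  let r := PySem.Str.lower review
  let keys := sentiments_dict_row.map Prod.fst
  ((∃ kw ∈ (["cute", "cute style", "flattering", "beautiful", "pretty", "color", "cool", "lining", "flowy", "lovely"] : List String), PySem.Str.isIn kw r = true) → "Design and Appearance" ∈ keys) ∧
  ((∃ kw ∈ (["small", "fit"] : List String), PySem.Str.isIn kw r = true) → "Size and Fit" ∈ keys) ∧
  ((∃ kw ∈ (["comfort", "comfy", "comfortable"] : List String), PySem.Str.isIn kw r = true) → "Comfort" ∈ keys) ∧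
  (PySem.Str.isIn "nature calls" r = true → "Usage Scenarios and Applicability" ∈ keys) ∧
  ((∃ kw ∈ (["steam", "iron"] : List String), PySem.Str.isIn kw r = true) → "Washing and Maintenance" ∈ keys) ∧
  ((∃ kw ∈ (["different", "itchy"] : List String), PySem.Str.isIn kw r = true) → "Fabric" ∈ keys)
instance (sentiments_dict_row : List (String × String)) (review : String) : Decidable (Pre_sentiment_matching_v2 sentiments_dict_row review) := by unfold Pre_sentiment_matching_v2; infer_instance

def pvWitness_sentiment_matching_v2 : (List (String × String)) × String :=
  ([("Design and Appearance", "Neutral"), ("Size and Fit", "Neutral"), ("Comfort", "Neutral"),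
    ("Usage Scenarios and Applicability", "Neutral"), ("Washing and Maintenance", "Neutral"), ("Fabric", "Neutral")],
   "Pretty color but a bit tight, still comfy")

def Spec_sentiment_matching_v2 (sentiments_dict_row : List (String × String)) (review : String) (out : List (String × String)) : Prop := out = sentiment_matching_v2_alt sentiments_dict_row review
instance (sentiments_dict_row : List (String × String)) (review : String) (out : List (String × String)) : Decidable (Spec_sentiment_matching_v2 sentiments_dict_row review out) := by unfold Spec_sentiment_matching_v2; infer_instance

-- ===== CLAIM (what is proved, stated in full; the proofs are below) =====
def Claim_equal_sentiment_matching_v2 : Prop := ∀ (sentiments_dict_row : List (String × String)) (review : String), Dom_sentiment_matching_v2 sentiments_dict_row review → Pre_sentiment_matching_v2 sentiments_dict_row review → Spec_sentiment_matching_v2 sentiments_dict_row review (sentiment_matching_v2 sentiments_dict_row review)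

-- ===== LEMMAS AND PROOFS =====
theorem pvHit_cons (r kw : String) (rest : List String) :
    pvHit r (kw :: rest) = (PySem.Str.isIn kw r || pvHit r rest) := rfl

-- characterisation of A's three loop shapes as a single conditional insert
theorem loopUncond_char (r key v : String) (pool : List String) (d : PySem.Dict String String) :
    pvLoopUncond r key v pool d = if pvHit r pool = true then d.insert key v else d := by
  induction pool generalizing d with
  | nil => rfl
  | cons kw rest ih =>
    unfold pvLoopUncond at ih ⊢
    rw [List.foldl_cons]
    by_cases h : PySem.Str.isIn kw r = true
    · have hh : pvHit r (kw :: rest) = true := by rw [pvHit_cons, h, Bool.true_or]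
      rw [if_pos h, ih, if_pos hh]
      by_cases h2 : pvHit r rest = true
      · rw [if_pos h2, PySem.Dict.insert_insert_self]
      · rw [if_neg h2]
    · have h' : PySem.Str.isIn kw r = false := by
        cases hx : PySem.Str.isIn kw r
        · rfl
        · exact absurd hx h
      have hq : pvHit r (kw :: rest) = pvHit r rest := by
        rw [pvHit_cons, h', Bool.false_or]
      rw [if_neg h, ih, hq]

theorem loopNe_char (r key ref v : String) (hvr : v ≠ ref) (pool : List String) (d : PySem.Dict String String) :
    pvLoopNe r key ref v pool d =
      if pvHit r pool = true ∧ d.getD key "" ≠ ref then d.insert key v else d := by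
  induction pool generalizing d with
  | nil => rfl
  | cons kw rest ih =>
    unfold pvLoopNe at ih ⊢
    rw [List.foldl_cons]
    by_cases h : PySem.Str.isIn kw r = true ∧ d.getD key "" ≠ ref
    · have hh : pvHit r (kw :: rest) = true := by rw [pvHit_cons, h.1, Bool.true_or]
      rw [if_pos h, ih, PySem.Dict.getD_insert_self]
      by_cases h2 : pvHit r rest = true
      · rw [if_pos ⟨h2, hvr⟩, PySem.Dict.insert_insert_self, if_pos ⟨hh, h.2⟩]
      · rw [if_neg (fun hc => h2 hc.1), if_pos ⟨hh, h.2⟩]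
    · rw [if_neg h, ih]
      by_cases hg : d.getD key "" = ref
      · rw [if_neg (fun hc => hc.2 hg), if_neg (fun hc => hc.2 hg)]
      · have h' : PySem.Str.isIn kw r = false := by
          cases hx : PySem.Str.isIn kw r
          · rfl
          · exact absurd ⟨hx, hg⟩ h
        have hq : pvHit r (kw :: rest) = pvHit r rest := by
          rw [pvHit_cons, h', Bool.false_or]
        rw [hq]

theorem loopEq_char (r key ref v : String) (hvr : v ≠ ref) (pool : List String) (d : PySem.Dict String String) :
    pvLoopEq r key ref v pool d =
      if pvHit r pool = true ∧ d.getD key "" = ref then d.insert key v else d := by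
  induction pool generalizing d with
  | nil => rfl
  | cons kw rest ih =>
    unfold pvLoopEq at ih ⊢
    rw [List.foldl_cons]
    by_cases h : PySem.Str.isIn kw r = true ∧ d.getD key "" = ref
    · have hh : pvHit r (kw :: rest) = true := by rw [pvHit_cons, h.1, Bool.true_or]
      rw [if_pos h, ih, PySem.Dict.getD_insert_self,
        if_neg (fun hc => hvr hc.2), if_pos ⟨hh, h.2⟩]
    · rw [if_neg h, ih]
      by_cases hg : d.getD key "" = ref
      · have h' : PySem.Str.isIn kw r = false := by
          cases hx : PySem.Str.isIn kw r
          · rfl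
          · exact absurd ⟨hx, hg⟩ h
        have hq : pvHit r (kw :: rest) = pvHit r rest := by
          rw [pvHit_cons, h', Bool.false_or]
        rw [hq]
      · rw [if_neg (fun hc => hg hc.2), if_neg (fun hc => hg hc.2)]

-- per-category block lemmas: A's loop block equals B's single judged step
theorem block_design (r : String) (d : PySem.Dict String String) :
    pvLoopUncond r "Design and Appearance" "Positive" ["pretty dress"]
      (pvLoopNe r "Design and Appearance" "Negative" "Positive"
        ["cute", "cute style", "flattering", "beautiful", "pretty", "color", "cool", "lining", "flowy", "lovely"] d)
      = pvStep d ("Design and Appearance", pvDesign r) := by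
  rw [loopNe_char r _ _ _ (by decide), loopUncond_char]
  simp only [pvStep, pvDesign]
  generalize pvHit r ["cute", "cute style", "flattering", "beautiful", "pretty", "color", "cool", "lining", "flowy", "lovely"] = b1
  generalize pvHit r ["pretty dress"] = b2
  rcases hg : d.get? "Design and Appearance" with _ | c
  · cases b1 <;> cases b2 <;>
      simp_all [PySem.Dict.getD_eq_get?_getD, PySem.Dict.getD_insert_self,
        PySem.Dict.get?_insert_self, PySem.Dict.insert_insert_self]
  · cases b1 <;> cases b2 <;> by_cases hN : c = "Negative" <;>
      simp_all [PySem.Dict.getD_eq_get?_getD, PySem.Dict.getD_insert_self,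
        PySem.Dict.get?_insert_self, PySem.Dict.insert_insert_self]

theorem block_size (r : String) (d : PySem.Dict String String) :
    pvLoopUncond r "Size and Fit" "Negative" ["tight"]
      (pvLoopNe r "Size and Fit" "Negative" "Positive" ["fit"]
        (pvLoopNe r "Size and Fit" "Positive" "Negative" ["small"] d))
      = pvStep d ("Size and Fit", pvSizeFit r) := by
  rw [loopNe_char r _ _ _ (by decide), loopNe_char r _ _ _ (by decide), loopUncond_char]
  simp only [pvStep, pvSizeFit]
  generalize pvHit r ["tight"] = bT
  generalize pvHit r ["fit"] = bF
  generalize pvHit r ["small"] = bS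
  rcases hg : d.get? "Size and Fit" with _ | c
  · cases bT <;> cases bF <;> cases bS <;>
      simp_all [PySem.Dict.getD_eq_get?_getD, PySem.Dict.getD_insert_self,
        PySem.Dict.get?_insert_self, PySem.Dict.insert_insert_self]
  · cases bT <;> cases bF <;> cases bS <;>
      by_cases hP : c = "Positive" <;> by_cases hN : c = "Negative" <;>
        simp_all [PySem.Dict.getD_eq_get?_getD, PySem.Dict.getD_insert_self,
          PySem.Dict.get?_insert_self, PySem.Dict.insert_insert_self]

theorem block_comfort (r : String) (d : PySem.Dict String String) :
    pvLoopNe r "Comfort" "Negative" "Positive" ["comfort", "comfy", "comfortable"] d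
      = pvStep d ("Comfort", pvComfort r) := by
  rw [loopNe_char r _ _ _ (by decide)]
  simp only [pvStep, pvComfort]
  generalize pvHit r ["comfort", "comfy", "comfortable"] = b1
  rcases hg : d.get? "Comfort" with _ | c
  · cases b1 <;> simp_all [PySem.Dict.getD_eq_get?_getD]
  · cases b1 <;> by_cases hN : c = "Negative" <;> simp_all [PySem.Dict.getD_eq_get?_getD]

theorem block_usage (r : String) (d : PySem.Dict String String) :
    pvLoopNe r "Usage Scenarios and Applicability" "Positive" "Negative" ["nature calls"] d
      = pvStep d ("Usage Scenarios and Applicability", pvUsage r) := by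
  rw [loopNe_char r _ _ _ (by decide)]
  simp only [pvStep, pvUsage]
  generalize pvHit r ["nature calls"] = b1
  rcases hg : d.get? "Usage Scenarios and Applicability" with _ | c
  · cases b1 <;> simp_all [PySem.Dict.getD_eq_get?_getD]
  · cases b1 <;> by_cases hP : c = "Positive" <;> simp_all [PySem.Dict.getD_eq_get?_getD]

theorem block_washing (r : String) (d : PySem.Dict String String) :
    pvLoopNe r "Washing and Maintenance" "Positive" "Negative" ["steam", "iron"] d
      = pvStep d ("Washing and Maintenance", pvWashing r) := by
  rw [loopNe_char r _ _ _ (by decide)]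
  simp only [pvStep, pvWashing]
  generalize pvHit r ["steam", "iron"] = b1
  rcases hg : d.get? "Washing and Maintenance" with _ | c
  · cases b1 <;> simp_all [PySem.Dict.getD_eq_get?_getD]
  · cases b1 <;> by_cases hP : c = "Positive" <;> simp_all [PySem.Dict.getD_eq_get?_getD]

theorem block_fabric (r : String) (d : PySem.Dict String String) :
    pvLoopUncond r "Fabric" "Positive" ["material is nice", "material is pleasant"]
      (pvLoopEq r "Fabric" "Neutral" "Negative" ["different", "itchy"] d)
      = pvStep d ("Fabric", pvFabric r) := by
  rw [loopEq_char r _ _ _ (by decide), loopUncond_char]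
  simp only [pvStep, pvFabric]
  generalize pvHit r ["different", "itchy"] = bD
  generalize pvHit r ["material is nice", "material is pleasant"] = bM
  rcases hg : d.get? "Fabric" with _ | c
  · cases bD <;> cases bM <;>
      simp_all [PySem.Dict.getD_eq_get?_getD, PySem.Dict.getD_insert_self,
        PySem.Dict.get?_insert_self, PySem.Dict.insert_insert_self]
  · cases bD <;> cases bM <;> by_cases hN : c = "Neutral" <;>
      simp_all [PySem.Dict.getD_eq_get?_getD, PySem.Dict.getD_insert_self,
        PySem.Dict.get?_insert_self, PySem.Dict.insert_insert_self]

-- ===== VERDICT (by name: the statement is the Claim_ definition above) =====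
theorem sentiment_matching_v2_spec : Claim_equal_sentiment_matching_v2 := by
  intro row review _ _
  unfold Spec_sentiment_matching_v2 sentiment_matching_v2 sentiment_matching_v2_alt
  simp only [List.foldl_cons, List.foldl_nil]
  rw [block_design, block_size, block_comfort, block_usage, block_washing, block_fabric]
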